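-- pv_equiv track=rewrite | github.com/Myralllka/UCU_python_labs_first_semester | lab5/egg_carton_box.py | egg_carton_box
-- ===== SOURCE A (Python) =====
-- def egg_carton_box(eggs):
--     '''
--     (number) -> list
--     Return list of values
--     the minimum number of boxes and which of boxes (4, 6, 10) we need
--
--     >>> egg_carton_box(12)
--     [6, 6]
--     >>> egg_carton_box(28)
--     [10, 10, 10]
--     >>> egg_carton_box(10)
--     [10]
--     >>> egg_carton_box(41)
--     [6, 6, 10, 10, 10]
--     >>> egg_carton_box(122)
--     [6, 6, 10, 10, 10, 10, 10, 10, 10, 10, 10, 10, 10]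
--     >>> egg_carton_box(27)
--     [10, 10, 10]
--     '''
--     result = []
--     helped_var = eggs
--     while (helped_var > 12):
--         helped_var -= 10
--         result.append(10)
--     if (helped_var == 10):
--         result.append(10)
--     elif (helped_var % 10 in range(1, 3)):
--         result.append(6)
--         result.append(6)
--     elif (helped_var in range(3, 5)):
--         result.append(4)
--     elif (helped_var in range(5, 7)):
--         result.append(6)
--     elif (helped_var == 0):
--         return ([])
--     else:
--         result.append(10)
--     return (sorted(result))
-- ===== SOURCE B (Python) =====
-- def egg_carton_box(eggs):
--     # closed-form count of 10-boxes instead of the decrement loop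
--     k = max(0, -((12 - eggs) // 10))
--     r = eggs - 10 * k
--     if r == 0:
--         return []
--     if r == 10:
--         extras = [10]
--     elif r % 10 in (1, 2):
--         extras = [6, 6]
--     elif 3 <= r <= 4:
--         extras = [4]
--     elif 5 <= r <= 6:
--         extras = [6]
--     else:
--         extras = [10]
--     return sorted([10] * k + extras)
-- ===== Notes on version B (the rewrite author's own statement) =====
-- stated objective: simpler
-- what changed: Replaces A's repeated-subtraction while-loop with a closed-form ceiling-division count of largest boxes, then classifies the remainder once and builds the replicated list plus the extras.
import Mathlib
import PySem

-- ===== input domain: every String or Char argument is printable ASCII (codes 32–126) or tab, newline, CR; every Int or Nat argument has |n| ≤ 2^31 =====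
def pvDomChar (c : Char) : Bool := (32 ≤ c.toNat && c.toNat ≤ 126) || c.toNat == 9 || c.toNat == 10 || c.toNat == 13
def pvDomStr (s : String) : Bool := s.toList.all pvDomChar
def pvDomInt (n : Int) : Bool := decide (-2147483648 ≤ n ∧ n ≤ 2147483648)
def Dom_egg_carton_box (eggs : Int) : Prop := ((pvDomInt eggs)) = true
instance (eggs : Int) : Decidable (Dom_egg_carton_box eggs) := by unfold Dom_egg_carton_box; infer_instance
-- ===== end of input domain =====

-- B replaces A's decrement loop by a closed-form count of 10-boxes (objective: simpler); return value only, no mutation.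

-- ===== PORT A =====
-- the 'while helped_var > 12: helped_var -= 10; result.append(10)' loop
def eggLoopA (h : Int) (res : List Int) : Int × List Int :=
  if h > 12 then eggLoopA (h - 10) (res ++ [10]) else (h, res)
termination_by (h - 2).toNat
decreasing_by omega

def egg_carton_box (eggs : Int) : List Int :=
  match eggLoopA eggs [] with
  | (h, result) =>
    if h = 10 then PySem.List.sorted (result ++ [10]) (fun x => x) false
    else if PySem.Int.mod h 10 = 1 ∨ PySem.Int.mod h 10 = 2 then
      PySem.List.sorted (result ++ [6, 6]) (fun x => x) false
    else if h = 3 ∨ h = 4 then PySem.List.sorted (result ++ [4]) (fun x => x) false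
    else if h = 5 ∨ h = 6 then PySem.List.sorted (result ++ [6]) (fun x => x) false
    else if h = 0 then []
    else PySem.List.sorted (result ++ [10]) (fun x => x) false

-- ===== PORT B =====
def egg_carton_box_alt (eggs : Int) : List Int :=
  let k : Int := max 0 (-(PySem.Int.floordiv (12 - eggs) 10))
  let r : Int := eggs - 10 * k
  if r = 0 then []
  else
    let extras : List Int :=
      if r = 10 then [10]
      else if PySem.Int.mod r 10 = 1 ∨ PySem.Int.mod r 10 = 2 then [6, 6]
      else if 3 ≤ r ∧ r ≤ 4 then [4]
      else if 5 ≤ r ∧ r ≤ 6 then [6]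
      else [10]
    PySem.List.sorted (List.replicate k.toNat 10 ++ extras) (fun x => x) false

-- ===== PRECONDITION & SPEC =====
def Spec_egg_carton_box (eggs : Int) (out : List Int) : Prop := out = egg_carton_box_alt eggs
instance (eggs : Int) (out : List Int) : Decidable (Spec_egg_carton_box eggs out) := by unfold Spec_egg_carton_box; infer_instance

-- ===== CLAIM (what is proved, stated in full; the proofs are below) =====
def Claim_equal_egg_carton_box : Prop := ∀ (eggs : Int), Dom_egg_carton_box eggs → Spec_egg_carton_box eggs (egg_carton_box eggs)

-- ===== LEMMAS AND PROOFS =====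

theorem mod10_eq (a : Int) : PySem.Int.mod a 10 = a % 10 :=
  PySem.Int.mod_eq_emod_of_pos (by norm_num)

theorem fd10_eq (a : Int) : PySem.Int.floordiv a 10 = a / 10 :=
  PySem.Int.floordiv_eq_ediv_of_pos (by norm_num)

-- the loop's result, in closed form
theorem eggLoopA_eq (h : Int) (res : List Int) :
    eggLoopA h res =
      (h - 10 * max 0 (-(PySem.Int.floordiv (12 - h) 10)),
       res ++ List.replicate (max 0 (-(PySem.Int.floordiv (12 - h) 10))).toNat 10) := by
  rw [fd10_eq]
  by_cases hc : h > 12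
  · rw [eggLoopA, if_pos hc, eggLoopA_eq (h - 10) (res ++ [10]), fd10_eq]
    have h1 : max 0 (-((12 - h) / 10)) = max 0 (-((12 - (h - 10)) / 10)) + 1 := by omega
    have h2 : (max 0 (-((12 - (h - 10)) / 10)) + 1).toNat
        = (max 0 (-((12 - (h - 10)) / 10))).toNat + 1 := by omega
    rw [h1, h2, Prod.mk.injEq]
    refine ⟨by ring_nf, ?_⟩
    rw [List.append_assoc, List.replicate_succ]
    rfl
  · rw [eggLoopA, if_neg hc]
    have : max 0 (-((12 - h) / 10)) = 0 := by omega
    rw [this]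
    simp
termination_by (h - 2).toNat
decreasing_by omega

-- ===== VERDICT (by name: the statement is the Claim_ definition above) =====
theorem egg_carton_box_spec : Claim_equal_egg_carton_box := by
  intro eggs _
  unfold Spec_egg_carton_box egg_carton_box egg_carton_box_alt
  rw [eggLoopA_eq]
  simp only [List.nil_append, mod10_eq]
  set k : Int := max 0 (-(PySem.Int.floordiv (12 - eggs) 10)) with hk
  have hk0 : 0 ≤ k := le_max_left 0 _
  set r : Int := eggs - 10 * k with hr
  split_ifs <;> first | rfl | omega
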